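-- pv_equiv track=rewrite | github.com/olzlgur/baekjoon-practice | test11/1.py | solution
-- ===== SOURCE A (Python) =====
-- def solution(S):
--     # Implement your solution here
--     left, right = 0, len(S) -1
--     answer = 0
--     if S[left] == S[right]:
--         answer += 1
--
--     left, right = 1, 0
--
--     for _ in range(1, len(S)):
--         if S[left] == S[right]:
--             answer += 1
--         left += 1
--         right += 1
--
--     return answer
-- ===== SOURCE B (Python) =====
-- def solution(S):
--     runs = []
--     for c in S:
--         if runs and runs[-1][0] == c:
--             runs[-1][1] += 1
--         else:
--             runs.append([c, 1])
--     return len(S) - len(runs) + (S[0] == S[-1])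
-- ===== Notes on version B (the rewrite author's own statement) =====
-- stated objective: alternative
-- what changed: B builds a run-length encoding of S and derives the adjacent-equal-pair count as len(S) minus the number of runs, instead of A's two-pointer index walk comparing each consecutive pair.
import Mathlib
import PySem

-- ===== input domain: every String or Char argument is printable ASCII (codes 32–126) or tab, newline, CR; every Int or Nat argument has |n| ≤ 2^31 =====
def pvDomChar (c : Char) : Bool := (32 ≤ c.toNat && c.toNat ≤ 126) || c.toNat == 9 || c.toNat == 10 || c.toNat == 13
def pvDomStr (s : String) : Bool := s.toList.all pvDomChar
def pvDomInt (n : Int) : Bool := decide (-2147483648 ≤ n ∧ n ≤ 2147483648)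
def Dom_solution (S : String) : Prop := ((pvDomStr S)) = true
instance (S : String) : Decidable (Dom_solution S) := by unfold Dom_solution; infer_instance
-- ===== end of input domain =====

-- B builds a run-length encoding of S and computes the answer as len(S) - (number of runs)
-- plus the S[0]==S[-1] wrap check, instead of A's two-pointer index walk (objective: alternative).

-- ===== PORT A =====
def solution (S : String) : Int :=
  let l := S.toList
  let n : Int := l.length
  let answer : Int := if PySem.List.pyGet? l 0 = PySem.List.pyGet? l (n - 1) then 1 else 0
  let st := (PySem.List.pyRange 1 n 1).foldl
    (fun (st : Int × Int × Int) _ =>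
      ((if PySem.List.pyGet? l st.2.1 = PySem.List.pyGet? l st.2.2 then st.1 + 1 else st.1),
        st.2.1 + 1, st.2.2 + 1))
    (answer, 1, 0)
  st.1

-- ===== PORT B =====
-- one step of B's loop: extend the last run or start a new one ('runs and runs[-1][0] == c')
def runStep (runs : List (Char × Int)) (c : Char) : List (Char × Int) :=
  match runs.getLast? with
  | some p => if p.1 = c then runs.dropLast ++ [(p.1, p.2 + 1)] else runs ++ [(c, 1)]
  | none => runs ++ [(c, 1)]

def solution_alt (S : String) : Int :=
  let l := S.toList
  let runs := l.foldl runStep []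
  (l.length : Int) - runs.length
    + (if PySem.List.pyGet? l 0 = PySem.List.pyGet? l (-1) then 1 else 0)

-- ===== PRECONDITION & SPEC =====
-- Pre_ excludes only the empty string, on which both Pythons raise IndexError (S[0]/S[-1]).
def Pre_solution (S : String) : Prop := S ≠ ""
instance (S : String) : Decidable (Pre_solution S) := by unfold Pre_solution; infer_instance
def pvWitness_solution : String := "ab"
def Spec_solution (S : String) (out : Int) : Prop := out = solution_alt S
instance (S : String) (out : Int) : Decidable (Spec_solution S out) := by unfold Spec_solution; infer_instance

-- ===== CLAIM (what is proved, stated in full; the proofs are below) =====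
def Claim_equal_solution : Prop := ∀ (S : String), Dom_solution S → Pre_solution S → Spec_solution S (solution S)

-- ===== LEMMAS AND PROOFS =====

-- number of equal adjacent pairs among indices (j, j+1), …, (j+m-1, j+m)
def cntAdj (l : List Char) (j m : Nat) : Int :=
  match m with
  | 0 => 0
  | m + 1 => (if l[j+1]? = l[j]? then 1 else 0) + cntAdj l (j+1) m

-- equal-adjacent-pair count of d :: l, written with the previous character threaded through
def cntFrom (d : Char) : List Char → Int
  | [] => 0
  | c :: t => (if d = c then 1 else 0) + cntFrom c t

-- number of runs of d :: l after the first run, with the previous character threaded through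
def runsAfter (d : Char) : List Char → Int
  | [] => 0
  | c :: t => (if d = c then 0 else 1) + runsAfter c t

theorem cntAdj_shift (a : Char) (l : List Char) : ∀ (m j : Nat),
    cntAdj (a :: l) (j+1) m = cntAdj l j m := by
  intro m
  induction m with
  | zero => intro j; rfl
  | succ m ih =>
    intro j
    simp [cntAdj, ih (j+1)]

theorem fold_eq (l : List Char) : ∀ (L : List Int) (a : Int) (k : Nat),
    (L.foldl
      (fun (st : Int × Int × Int) _ =>
        ((if PySem.List.pyGet? l st.2.1 = PySem.List.pyGet? l st.2.2 then st.1 + 1 else st.1),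
          st.2.1 + 1, st.2.2 + 1))
      (a, (k : Int) + 1, (k : Int))).1
    = a + cntAdj l k L.length := by
  intro L
  induction L with
  | nil => intro a k; simp [cntAdj]
  | cons x L ih =>
    intro a k
    have h1 : ((k : Int) + 1) = ((k + 1 : Nat) : Int) := by push_cast; ring
    have h2 : ((k : Int) + 1 + 1) = ((k + 1 : Nat) : Int) + 1 := by push_cast; ring
    simp only [List.foldl_cons]
    rw [h2, h1, ih, PySem.List.pyGet?_natCast, PySem.List.pyGet?_natCast]
    simp only [cntAdj, List.length_cons]
    split_ifs <;> ring

theorem cntAdj_eq_cntFrom : ∀ (t : List Char) (a : Char),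
    cntAdj (a :: t) 0 ((a :: t).length - 1) = cntFrom a t := by
  intro t
  induction t with
  | nil => intro a; rfl
  | cons c t' ih =>
    intro a
    have : cntAdj (a :: c :: t') 0 ((a :: c :: t').length - 1)
        = (if c = a then (1:Int) else 0) + cntAdj (c :: t') 0 ((c :: t').length - 1) := by
      simp only [List.length_cons, Nat.add_sub_cancel, cntAdj]
      rw [cntAdj_shift]
      simp
    rw [this, ih]
    by_cases hac : a = c
    · simp [cntFrom, hac]
    · have hca : ¬ c = a := fun h => hac h.symm
      simp [cntFrom, hac, hca]

-- run-length fold invariant: processing l onto a nonempty runs list whose last char is p.1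
-- adds exactly runsAfter p.1 l runs
theorem foldl_runStep_len : ∀ (l : List Char) (runs : List (Char × Int)) (p : Char × Int),
    runs.getLast? = some p →
    ((l.foldl runStep runs).length : Int) = runs.length + runsAfter p.1 l := by
  intro l
  induction l with
  | nil => intro runs p _; simp [runsAfter]
  | cons c t ih =>
    intro runs p hlast
    have hne : runs ≠ [] := by intro h; rw [h] at hlast; simp at hlast
    have hpos : 0 < runs.length := List.length_pos_iff.mpr hne
    simp only [List.foldl_cons, runStep, hlast]
    by_cases hpc : p.1 = c
    · rw [if_pos hpc, ih _ (p.1, p.2 + 1) List.getLast?_concat]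
      simp only [List.length_append, List.length_dropLast, List.length_cons, List.length_nil,
        runsAfter, hpc]
      push_cast
      omega
    · rw [if_neg hpc, ih _ (c, 1) List.getLast?_concat]
      simp only [List.length_append, List.length_cons, List.length_nil, runsAfter, if_neg hpc]
      push_cast
      ring

theorem runsAfter_add_cntFrom : ∀ (t : List Char) (d : Char),
    runsAfter d t + cntFrom d t = t.length := by
  intro t
  induction t with
  | nil => intro d; simp [runsAfter, cntFrom]
  | cons c t' ih =>
    intro d
    simp only [runsAfter, cntFrom, List.length_cons]
    have := ih c
    split_ifs <;> push_cast <;> omega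

theorem getLast?_eq (l : List Char) (h : l ≠ []) :
    PySem.List.pyGet? l ((l.length : Int) - 1) = PySem.List.pyGet? l (-1) := by
  have hlen : 1 ≤ l.length := List.length_pos_iff.mpr h
  have : ((l.length : Int) - 1) = ((l.length - 1 : Nat) : Int) := by omega
  rw [this, PySem.List.pyGet?_natCast, PySem.List.pyGet?_neg_one]
  rw [List.getLast?_eq_getElem?]

-- ===== VERDICT (by name: the statement is the Claim_ definition above) =====
theorem solution_spec : Claim_equal_solution := by
  intro S _ hpre
  have hne : S.toList ≠ [] := by
    intro h
    exact hpre (by simpa using congrArg String.ofList h)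
  show solution S = solution_alt S
  obtain ⟨a, t, hl⟩ : ∃ a t, S.toList = a :: t := by
    cases h : S.toList with
    | nil => exact absurd h hne
    | cons a t => exact ⟨a, t, rfl⟩
  unfold solution solution_alt
  simp only []
  rw [getLast?_eq S.toList hne]
  rw [show ((if PySem.List.pyGet? S.toList 0 = PySem.List.pyGet? S.toList (-1) then (1:Int) else 0),
        (1 : Int), (0 : Int))
      = ((if PySem.List.pyGet? S.toList 0 = PySem.List.pyGet? S.toList (-1) then (1:Int) else 0),
        ((0 : Nat) : Int) + 1, ((0 : Nat) : Int)) from by norm_num]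
  rw [fold_eq]
  rw [show (PySem.List.pyRange 1 (S.toList.length : Int) 1).length
      = S.toList.length - 1 from by
    rw [PySem.List.length_pyRange_one]; omega]
  rw [hl]
  rw [cntAdj_eq_cntFrom]
  have hfold := foldl_runStep_len t [(a, 1)] (a, 1) rfl
  simp only [List.foldl_cons]
  rw [show runStep [] a = [(a, 1)] from rfl]
  rw [hfold]
  have := runsAfter_add_cntFrom t a
  simp only [List.length_cons, List.length_nil]
  push_cast
  split_ifs <;> omega
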